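-- pv_equiv track=rewrite | github.com/Ltwicke/Topia_RL | RL/models/movement_module.py | _chebyshev_ids
-- ===== SOURCE A (Python) =====
-- from typing import Dict, List, Sequence
--
-- def _chebyshev_ids(
--     tile_id: int, radius: int, Nx: int, Ny: int
-- ) -> List[int]:
--     """All tile IDs within Chebyshev distance `radius` of `tile_id`."""
--     row, col = divmod(tile_id, Ny)
--     ids: List[int] = []
--     for dr in range(-radius, radius + 1):
--         for dc in range(-radius, radius + 1):
--             r, c = row + dr, col + dc
--             if 0 <= r < Nx and 0 <= c < Ny:
--                 ids.append(r * Ny + c)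
--     return ids
-- ===== SOURCE B (Python) =====
-- def _chebyshev_ids(tile_id, radius, Nx, Ny):
--     """All tile IDs within Chebyshev distance `radius` of `tile_id`."""
--     row, col = divmod(tile_id, Ny)
--     rlo, rhi = max(0, row - radius), min(Nx, row + radius + 1)
--     clo, chi = max(0, col - radius), min(Ny, col + radius + 1)
--     h, w = rhi - rlo, chi - clo
--     if h <= 0 or w <= 0:
--         return []
--     base = rlo * Ny + clo
--     return [base + (i // w) * Ny + (i % w) for i in range(h * w)]
-- ===== Notes on version B (the rewrite author's own statement) =====
-- stated objective: faster
-- what changed: B replaces A's nested offset loops with per-cell bounds checks by a closed-form enumeration: it computes the clamped rectangle's height h and width w once and generates the ids in one flat pass over range(h*w), mapping each flat index i to an id via divmod arithmetic (base + (i//w)*Ny + i%w), with no per-cell bounds test and no iteration over out-of-grid offsets.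
import Mathlib
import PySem

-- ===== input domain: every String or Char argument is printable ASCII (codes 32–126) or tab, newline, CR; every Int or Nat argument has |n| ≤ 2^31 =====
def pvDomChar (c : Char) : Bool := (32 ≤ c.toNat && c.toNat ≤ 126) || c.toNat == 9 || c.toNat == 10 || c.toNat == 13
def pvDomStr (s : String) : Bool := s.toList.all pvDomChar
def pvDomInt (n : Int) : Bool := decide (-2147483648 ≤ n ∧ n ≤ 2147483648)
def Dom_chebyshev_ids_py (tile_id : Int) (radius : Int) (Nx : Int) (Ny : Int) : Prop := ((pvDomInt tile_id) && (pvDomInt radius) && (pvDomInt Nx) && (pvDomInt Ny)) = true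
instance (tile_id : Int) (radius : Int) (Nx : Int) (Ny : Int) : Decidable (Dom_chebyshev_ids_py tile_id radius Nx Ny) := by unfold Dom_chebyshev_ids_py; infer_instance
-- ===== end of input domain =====

-- B replaces A's nested offset loops + per-cell bounds checks by a closed-form flat
-- enumeration of the clamped rectangle: one pass over range(h*w) mapping each flat
-- index to an id by divmod arithmetic (objective: alternative).


-- ===== PORT A =====
def chebyshev_ids_py (tile_id : Int) (radius : Int) (Nx : Int) (Ny : Int) : List Int :=
  let row := PySem.Int.floordiv tile_id Ny
  let col := PySem.Int.mod tile_id Ny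
  (PySem.List.pyRange (-radius) (radius + 1) 1).foldl (fun ids dr =>
    (PySem.List.pyRange (-radius) (radius + 1) 1).foldl (fun ids dc =>
      if 0 ≤ row + dr ∧ row + dr < Nx ∧ 0 ≤ col + dc ∧ col + dc < Ny
      then ids ++ [(row + dr) * Ny + (col + dc)] else ids) ids) []

-- ===== PORT B =====
def chebyshev_ids_py_alt (tile_id : Int) (radius : Int) (Nx : Int) (Ny : Int) : List Int :=
  let row := PySem.Int.floordiv tile_id Ny
  let col := PySem.Int.mod tile_id Ny
  let rlo := max 0 (row - radius)
  let rhi := min Nx (row + radius + 1)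
  let clo := max 0 (col - radius)
  let chi := min Ny (col + radius + 1)
  let h := rhi - rlo
  let w := chi - clo
  if h ≤ 0 ∨ w ≤ 0 then []
  else
    let base := rlo * Ny + clo
    (PySem.List.pyRange 0 (h * w) 1).map (fun i =>
      base + PySem.Int.floordiv i w * Ny + PySem.Int.mod i w)

-- ===== PRECONDITION & SPEC =====
-- Pre_ excludes exactly Ny = 0, on which Python's divmod raises ZeroDivisionError (in both A and B).
def Pre_chebyshev_ids_py (tile_id : Int) (radius : Int) (Nx : Int) (Ny : Int) : Prop := Ny ≠ 0
instance (tile_id : Int) (radius : Int) (Nx : Int) (Ny : Int) : Decidable (Pre_chebyshev_ids_py tile_id radius Nx Ny) := by unfold Pre_chebyshev_ids_py; infer_instance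
def pvWitness_chebyshev_ids_py : Int × Int × Int × Int := (7, 1, 4, 5)

def Spec_chebyshev_ids_py (tile_id : Int) (radius : Int) (Nx : Int) (Ny : Int) (out : List Int) : Prop := out = chebyshev_ids_py_alt tile_id radius Nx Ny
instance (tile_id : Int) (radius : Int) (Nx : Int) (Ny : Int) (out : List Int) : Decidable (Spec_chebyshev_ids_py tile_id radius Nx Ny out) := by unfold Spec_chebyshev_ids_py; infer_instance

-- ===== CLAIM (what is proved, stated in full; the proofs are below) =====
def Claim_equal_chebyshev_ids_py : Prop := ∀ (tile_id : Int) (radius : Int) (Nx : Int) (Ny : Int), Dom_chebyshev_ids_py tile_id radius Nx Ny → Pre_chebyshev_ids_py tile_id radius Nx Ny → Spec_chebyshev_ids_py tile_id radius Nx Ny (chebyshev_ids_py tile_id radius Nx Ny)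

-- ===== LEMMAS AND PROOFS =====

-- Shifting an integer range = mapping the shift over it.
theorem pyRange_map_add (t a b : Int) :
    PySem.List.pyRange (t + a) (t + b) 1 = (PySem.List.pyRange a b 1).map (fun x => t + x) := by
  rw [PySem.List.pyRange_one, PySem.List.pyRange_one, List.map_map]
  have h : t + b - (t + a) = b - a := by ring
  rw [h]
  exact List.map_congr_left (fun k _ => by simp [Function.comp]; ring)

-- Appending under a decidable test = filter-then-map.
theorem foldl_append_ite {α β : Type} (P : α → Prop) [DecidablePred P] (f : α → β)
    (l : List α) (acc : List β) :
    l.foldl (fun acc x => if P x then acc ++ [f x] else acc) acc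
      = acc ++ (l.filter (fun x => decide (P x))).map f := by
  induction l generalizing acc with
  | nil => simp
  | cons x xs ih =>
    simp only [List.foldl_cons, List.filter_cons]
    by_cases h : P x <;> simp [h, ih]

-- Filtering a range by a bound interval = the clamped range.
theorem filter_pyRange_inter (lo hi : Int) :
    ∀ (n : Nat) (a b : Int), (b - a).toNat = n →
      (PySem.List.pyRange a b 1).filter (fun x => decide (lo ≤ x ∧ x < hi))
        = PySem.List.pyRange (max a lo) (min b hi) 1 := by
  intro n
  induction n with
  | zero =>
    intro a b hn
    rw [PySem.List.pyRange_one_eq_nil (by omega), PySem.List.pyRange_one_eq_nil (by omega)]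
    simp
  | succ m ih =>
    intro a b hn
    rw [PySem.List.pyRange_one_cons (show a < b by omega)]
    simp only [List.filter_cons]
    have h1 := ih (a + 1) b (by omega)
    by_cases h : lo ≤ a ∧ a < hi
    · simp only [h, and_self, decide_true]
      rw [h1, show max (a + 1) lo = a + 1 by omega, show max a lo = a by omega,
        PySem.List.pyRange_one_cons (show a < min b hi by omega)]
      simp
    · simp only [decide_eq_true_eq, h, if_false]
      rw [h1]
      by_cases hlo : a < lo
      · rw [show max (a + 1) lo = max a lo by omega]
      · rw [PySem.List.pyRange_one_eq_nil (by omega), PySem.List.pyRange_one_eq_nil (by omega)]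

-- flatMap ignores elements whose image is empty.
theorem flatMap_filter_of_nil {α β : Type} (p : α → Bool) (g : α → List β) (l : List α)
    (h : ∀ x, p x = false → g x = []) :
    (l.filter p).flatMap g = l.flatMap g := by
  induction l with
  | nil => simp
  | cons x xs ih =>
    simp only [List.filter_cons, List.flatMap_cons]
    cases hp : p x with
    | true => simp [List.flatMap_cons, ih]
    | false => simp [h x hp, ih]

theorem flatMap_congr_mem {α β : Type} {l : List α} {f g : α → List β}
    (h : ∀ x ∈ l, f x = g x) : l.flatMap f = l.flatMap g := by
  induction l with
  | nil => rfl
  | cons x xs ih =>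
    simp only [List.flatMap_cons]
    rw [h x (by simp), ih (fun y hy => h y (by simp [hy]))]

-- Step 1 of the equivalence: A's nested offset loops equal a flatMap of contiguous
-- per-row ranges over the clamped row range (stated over the decoded (row, col)).
theorem chebyshev_key (row col radius Nx Ny : Int) :
    (PySem.List.pyRange (-radius) (radius + 1) 1).foldl (fun ids dr =>
      (PySem.List.pyRange (-radius) (radius + 1) 1).foldl (fun ids dc =>
        if 0 ≤ row + dr ∧ row + dr < Nx ∧ 0 ≤ col + dc ∧ col + dc < Ny
        then ids ++ [(row + dr) * Ny + (col + dc)] else ids) ids) []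
    = (PySem.List.pyRange (max 0 (row - radius)) (min Nx (row + radius + 1)) 1).flatMap
        (fun r => PySem.List.pyRange (r * Ny + max 0 (col - radius))
          (r * Ny + min Ny (col + radius + 1)) 1) := by
  -- the per-row contribution of A's inner loop, as a function of the absolute row r
  let H : Int → List Int := fun r =>
    ((PySem.List.pyRange (-radius) (radius + 1) 1).filter
      (fun dc => decide (0 ≤ r ∧ r < Nx ∧ 0 ≤ col + dc ∧ col + dc < Ny))).map
      (fun dc => r * Ny + (col + dc))
  have stepA : (fun (ids : List Int) (dr : Int) =>
      (PySem.List.pyRange (-radius) (radius + 1) 1).foldl (fun ids dc =>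
        if 0 ≤ row + dr ∧ row + dr < Nx ∧ 0 ≤ col + dc ∧ col + dc < Ny
        then ids ++ [(row + dr) * Ny + (col + dc)] else ids) ids)
      = fun ids dr => ids ++ H (row + dr) := by
    funext ids dr
    exact foldl_append_ite _ _ _ _
  rw [stepA, PySem.List.foldl_append_eq_flatMap]
  simp only [List.nil_append]
  have hshift : (PySem.List.pyRange (-radius) (radius + 1) 1).flatMap (fun dr => H (row + dr))
      = (PySem.List.pyRange (row - radius) (row + radius + 1) 1).flatMap H := by
    rw [show row - radius = row + (-radius) by ring, show row + radius + 1 = row + (radius + 1) by ring,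
      pyRange_map_add, List.flatMap_map]
  rw [hshift]
  have hfilter : (PySem.List.pyRange (row - radius) (row + radius + 1) 1).flatMap H
      = ((PySem.List.pyRange (row - radius) (row + radius + 1) 1).filter
          (fun r => decide (0 ≤ r ∧ r < Nx))).flatMap H := by
    refine (flatMap_filter_of_nil _ _ _ ?_).symm
    intro r hr
    simp only [decide_eq_false_iff_not, not_and, not_lt] at hr
    simp only [H, List.map_eq_nil_iff, List.filter_eq_nil_iff]
    intro dc _
    simp only [decide_eq_true_eq]
    rintro ⟨h0, hNx, -⟩
    exact absurd (hr h0) (not_le.mpr hNx)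
  rw [hfilter, filter_pyRange_inter 0 Nx _ (row - radius) (row + radius + 1) rfl,
    max_comm (row - radius) 0, min_comm (row + radius + 1) Nx]
  refine flatMap_congr_mem ?_
  intro r hr
  rw [PySem.List.mem_pyRange_one] at hr
  have hrNx : 0 ≤ r ∧ r < Nx := by constructor <;> omega
  have hdrop : (fun dc => decide (0 ≤ r ∧ r < Nx ∧ 0 ≤ col + dc ∧ col + dc < Ny))
      = fun dc => decide (0 ≤ col + dc ∧ col + dc < Ny) := by
    funext dc
    simp [hrNx.1, hrNx.2]
  show H r = _
  simp only [H, hdrop]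
  rw [show PySem.List.pyRange (r * Ny + max 0 (col - radius)) (r * Ny + min Ny (col + radius + 1)) 1
      = (PySem.List.pyRange (max 0 (col - radius)) (min Ny (col + radius + 1)) 1).map
          (fun c => r * Ny + c) from pyRange_map_add _ _ _,
    ← min_comm (col + radius + 1) Ny, ← max_comm (col - radius) 0,
    ← filter_pyRange_inter 0 Ny _ (col - radius) (col + radius + 1) rfl,
    show col - radius = col + (-radius) by ring, show col + radius + 1 = col + (radius + 1) by ring,
    pyRange_map_add, List.filter_map, List.map_map]
  rfl

-- Step 2: the flatMap of h contiguous rows of width w equals the flat divmod enumeration.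
theorem rows_to_flat (Ny clo w : Int) (hw : 0 < w) :
    ∀ (n : Nat) (rlo : Int),
      (PySem.List.pyRange rlo (rlo + n) 1).flatMap
        (fun r => PySem.List.pyRange (r * Ny + clo) (r * Ny + clo + w) 1)
      = (PySem.List.pyRange 0 (n * w) 1).map (fun i =>
          rlo * Ny + clo + PySem.Int.floordiv i w * Ny + PySem.Int.mod i w) := by
  intro n
  induction n with
  | zero =>
    intro rlo
    rw [PySem.List.pyRange_one_eq_nil (by omega), PySem.List.pyRange_one_eq_nil (by simp)]
    rfl
  | succ m ih =>
    intro rlo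
    rw [PySem.List.pyRange_one_cons (show rlo < rlo + (↑(m + 1) : Int) by push_cast; omega)]
    simp only [List.flatMap_cons]
    have htail : rlo + (↑(m + 1) : Int) = (rlo + 1) + (m : Int) := by push_cast; ring
    rw [htail, ih (rlo + 1)]
    have hsplit : PySem.List.pyRange 0 ((↑(m + 1) : Int) * w) 1
        = PySem.List.pyRange 0 w 1 ++ PySem.List.pyRange w ((↑(m + 1) : Int) * w) 1 := by
      exact PySem.List.pyRange_one_append 0 w _ (by omega) (by push_cast; nlinarith)
    rw [hsplit, List.map_append]
    congr 1
    · -- first row: ids are base + i for i ∈ [0, w)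
      have hs := pyRange_map_add (rlo * Ny + clo) 0 w
      rw [show rlo * Ny + clo + 0 = rlo * Ny + clo by ring] at hs
      rw [hs]
      refine List.map_congr_left ?_
      intro i hi
      rw [PySem.List.mem_pyRange_one] at hi
      simp only [PySem.Int.floordiv_eq_ediv_of_pos hw, PySem.Int.mod_eq_emod_of_pos hw]
      rw [Int.ediv_eq_zero_of_lt hi.1 hi.2, Int.emod_eq_of_lt hi.1 hi.2]
      ring
    · -- remaining rows: reindex i = w + j
      rw [show (↑(m + 1) : Int) * w = w + (m : Int) * w by push_cast; ring]
      have hmap := pyRange_map_add w 0 ((m : Int) * w)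
      rw [show w + 0 = w by ring] at hmap
      rw [hmap, List.map_map]
      refine List.map_congr_left ?_
      intro j hj
      rw [PySem.List.mem_pyRange_one] at hj
      simp only [Function.comp]
      rw [show w + j = j + w * 1 by ring]
      simp only [PySem.Int.floordiv_eq_ediv_of_pos hw, PySem.Int.mod_eq_emod_of_pos hw]
      rw [Int.add_mul_ediv_left _ _ (show w ≠ 0 by omega), Int.add_mul_emod_self_left]
      ring

-- A row-wise flatMap of empty ranges is empty.
theorem flatMap_rows_of_nonpos (Ny clo chi : Int) (hw : chi ≤ clo) (l : List Int) :
    l.flatMap (fun r => PySem.List.pyRange (r * Ny + clo) (r * Ny + chi) 1) = [] := by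
  induction l with
  | nil => rfl
  | cons x xs ih =>
    simp only [List.flatMap_cons, ih, List.append_nil]
    exact PySem.List.pyRange_one_eq_nil (by omega)

-- ===== VERDICT (by name: the statement is the Claim_ definition above) =====
theorem chebyshev_ids_py_spec : Claim_equal_chebyshev_ids_py := by
  intro tile_id radius Nx Ny _ _
  show chebyshev_ids_py tile_id radius Nx Ny = chebyshev_ids_py_alt tile_id radius Nx Ny
  unfold chebyshev_ids_py chebyshev_ids_py_alt
  set row := PySem.Int.floordiv tile_id Ny with hrow
  set col := PySem.Int.mod tile_id Ny with hcol
  rw [chebyshev_key row col radius Nx Ny]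
  set rlo := max 0 (row - radius) with hrlo
  set rhi := min Nx (row + radius + 1) with hrhi
  set clo := max 0 (col - radius) with hclo
  set chi := min Ny (col + radius + 1) with hchi
  by_cases hcase : rhi - rlo ≤ 0 ∨ chi - clo ≤ 0
  · rw [if_pos hcase]
    rcases hcase with hh | hw
    · rw [PySem.List.pyRange_one_eq_nil (by omega)]
      rfl
    · exact flatMap_rows_of_nonpos Ny clo chi (by omega) _
  · rw [if_neg hcase]
    push_neg at hcase
    obtain ⟨hh, hw⟩ := hcase
    have hrhi' : rhi = rlo + ((rhi - rlo).toNat : Int) := by omega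
    have hchi' : ∀ r : Int, r * Ny + chi = r * Ny + clo + (chi - clo) := by intro r; ring
    rw [hrhi']
    have hfun : (fun r => PySem.List.pyRange (r * Ny + clo) (r * Ny + chi) 1)
        = fun r => PySem.List.pyRange (r * Ny + clo) (r * Ny + clo + (chi - clo)) 1 := by
      funext r; rw [hchi' r]
    rw [hfun, rows_to_flat Ny clo (chi - clo) (by omega) (rhi - rlo).toNat rlo,
      show ((rhi - rlo).toNat : Int) * (chi - clo) = (rhi - rlo) * (chi - clo) by
        rw [Int.toNat_of_nonneg (by omega)]]
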